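-- pv_equiv track=rewrite | github.com/floatingCatty/dpdata | dpdata/rescuplus/scf.py | split_formula
-- ===== SOURCE A (Python) =====
-- def split_formula(formula):
--     sform = []
--     i = 0
--     while i < len(formula):
--         tmp = formula[i]
--         i += 1
--         while i < len(formula) and not formula[i].isupper():
--             tmp += formula[i]
--             i += 1
--         sform.append(tmp)
--     return sform
-- ===== SOURCE B (Python) =====
-- def split_formula(formula):
--     # single right-to-left pass: flush a group whenever its leading uppercase char is seen
--     groups = []
--     cur = ''
--     for ch in reversed(formula):
--         cur = ch + cur
--         if ch.isupper():
--             groups.append(cur)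
--             cur = ''
--     if cur:
--         groups.append(cur)
--     groups.reverse()
--     return groups
-- ===== Notes on version B (the rewrite author's own statement) =====
-- stated objective: alternative
-- what changed: B replaces A's nested index-based while loops with a single right-to-left pass that flushes a group each time an uppercase group-leader character is seen, with a final leftover group for a lowercase-led prefix.
import Mathlib
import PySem

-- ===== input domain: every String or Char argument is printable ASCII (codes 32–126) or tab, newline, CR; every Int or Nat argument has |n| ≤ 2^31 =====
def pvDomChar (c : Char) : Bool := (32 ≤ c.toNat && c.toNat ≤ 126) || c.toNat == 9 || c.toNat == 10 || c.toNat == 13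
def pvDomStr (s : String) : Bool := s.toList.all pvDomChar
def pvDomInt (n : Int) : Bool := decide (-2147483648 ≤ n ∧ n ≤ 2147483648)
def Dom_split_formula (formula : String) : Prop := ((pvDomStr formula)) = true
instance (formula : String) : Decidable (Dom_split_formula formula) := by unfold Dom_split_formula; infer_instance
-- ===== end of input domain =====

-- B changes the decomposition: one right-to-left pass flushing at uppercase leaders, instead of A's
-- nested index-driven while loops; same cost (objective: alternative).

-- ===== PORT A =====
-- inner while loop of A: extend tmp while the next char is not uppercase; returns (tmp, rest)
def pvInnerA (tmp : List Char) (cs : List Char) : List Char × List Char :=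
  match cs with
  | [] => (tmp, [])
  | c :: rest => if PySem.Chars.isupper c then (tmp, c :: rest) else pvInnerA (tmp ++ [c]) rest

theorem pvInnerA_snd_le (tmp cs : List Char) : (pvInnerA tmp cs).2.length ≤ cs.length := by
  induction cs generalizing tmp with
  | nil => simp [pvInnerA]
  | cons c rest ih =>
    simp only [pvInnerA]
    split
    · simp
    · exact Nat.le_trans (ih _) (Nat.le_succ _)

-- outer while loop of A: take one char, run the inner loop, append the group
def pvOuterA (cs : List Char) : List (List Char) :=
  match cs with
  | [] => []
  | c :: rest =>
    let r := pvInnerA [c] rest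
    r.1 :: pvOuterA r.2
termination_by cs.length
decreasing_by
  simpa using Nat.lt_succ_of_le (pvInnerA_snd_le [c] rest)

def split_formula (formula : String) : List String :=
  (pvOuterA formula.toList).map String.mk

-- ===== PORT B =====
-- one step of B's loop over reversed(formula): prepend the char, flush the group if it is uppercase
def pvStepB (st : List Char × List (List Char)) (c : Char) : List Char × List (List Char) :=
  let cur := c :: st.1
  if PySem.Chars.isupper c then ([], cur :: st.2) else (cur, st.2)

def split_formula_alt (formula : String) : List String :=
  let r := formula.toList.reverse.foldl pvStepB ([], [])
  ((if r.1 = [] then r.2 else r.1 :: r.2)).map String.mk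

-- ===== PRECONDITION & SPEC =====
def Spec_split_formula (formula : String) (out : List String) : Prop := out = split_formula_alt formula
instance (formula : String) (out : List String) : Decidable (Spec_split_formula formula out) := by unfold Spec_split_formula; infer_instance

-- ===== CLAIM (what is proved, stated in full; the proofs are below) =====
def Claim_equal_split_formula : Prop := ∀ (formula : String), Dom_split_formula formula → Spec_split_formula formula (split_formula formula)

-- ===== LEMMAS AND PROOFS =====
theorem pvInnerA_eq (tmp cs : List Char) :
    pvInnerA tmp cs = (tmp ++ cs.takeWhile (fun c => !PySem.Chars.isupper c),
                       cs.dropWhile (fun c => !PySem.Chars.isupper c)) := by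
  induction cs generalizing tmp with
  | nil => simp [pvInnerA]
  | cons c rest ih =>
    simp only [pvInnerA, List.takeWhile_cons, List.dropWhile_cons]
    by_cases h : PySem.Chars.isupper c
    · simp [h]
    · simp [h, ih]

theorem pvOuterA_cons (c : Char) (rest : List Char) :
    pvOuterA (c :: rest) =
      (c :: rest.takeWhile (fun c => !PySem.Chars.isupper c)) ::
        pvOuterA (rest.dropWhile (fun c => !PySem.Chars.isupper c)) := by
  rw [pvOuterA]
  simp [pvInnerA_eq]

theorem pvFoldB_eq (cs : List Char) :
    cs.foldr (fun c st => pvStepB st c) ([], []) =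
      (cs.takeWhile (fun c => !PySem.Chars.isupper c),
       pvOuterA (cs.dropWhile (fun c => !PySem.Chars.isupper c))) := by
  induction cs with
  | nil => simp [pvOuterA]
  | cons c rest ih =>
    rw [List.foldr_cons, ih]
    by_cases h : PySem.Chars.isupper c
    · simp [pvStepB, h, List.takeWhile_cons, List.dropWhile_cons, pvOuterA_cons]
    · simp [pvStepB, h]

theorem pvMain (cs : List Char) :
    pvOuterA cs =
      (let r := cs.reverse.foldl pvStepB ([], [])
       if r.1 = [] then r.2 else r.1 :: r.2) := by
  rw [List.foldl_reverse, pvFoldB_eq]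
  cases cs with
  | nil => simp [pvOuterA]
  | cons c rest =>
    by_cases h : PySem.Chars.isupper c
    · simp [List.dropWhile_cons, h]
    · simp [h, pvOuterA_cons]

-- ===== VERDICT (by name: the statement is the Claim_ definition above) =====
theorem split_formula_spec : Claim_equal_split_formula := by
  intro formula _
  unfold Spec_split_formula split_formula split_formula_alt
  rw [pvMain]
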